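-- pv_equiv track=rewrite | github.com/lararodrigues107282/ATP2024 | TP7/tp7.py | maxPeriodoCalor
-- ===== SOURCE A (Python) =====
-- def maxPeriodoCalor(tab, p):
--     res = 0
--     consecutivo = 0
--     for i in tab:
--         if i[3] < p:
--             res += 1
--         else:
--             if res > consecutivo:
--                 consecutivo = res
--             res = 0
--     if res > consecutivo:
--                 consecutivo = res
--     return f'O nº de dias consecutivos com precipitação inferior a {p} é:', consecutivo
-- ===== SOURCE B (Python) =====
-- def maxPeriodoCalor(tab, p):
--     low = [row[3] < p for row in tab]
--
--     def run_len(bs):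
--         # length of the leading run of True and the remainder after it
--         k = 0
--         while k < len(bs) and bs[k]:
--             k += 1
--         return k, bs[k:]
--
--     def best(bs):
--         if not bs:
--             return 0
--         if bs[0]:
--             k, rest = run_len(bs[1:])
--             return max(k + 1, best(rest))
--         return best(bs[1:])
--
--     return f'O nº de dias consecutivos com precipitação inferior a {p} é:', best(low)
-- ===== Notes on version B (the rewrite author's own statement) =====
-- stated objective: alternative
-- what changed: B first maps the table to a boolean low-precipitation mask, then finds the longest True run by recursive run-splitting (measure a whole leading run, skip it, recurse), instead of A's single fold carrying a current-run/best-so-far accumulator pair with a trailing flush.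
-- outside the precondition, e.g. on maxPeriodoCalor([[1, 2]], 0): A raises IndexError, B raises IndexError
import Mathlib
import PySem

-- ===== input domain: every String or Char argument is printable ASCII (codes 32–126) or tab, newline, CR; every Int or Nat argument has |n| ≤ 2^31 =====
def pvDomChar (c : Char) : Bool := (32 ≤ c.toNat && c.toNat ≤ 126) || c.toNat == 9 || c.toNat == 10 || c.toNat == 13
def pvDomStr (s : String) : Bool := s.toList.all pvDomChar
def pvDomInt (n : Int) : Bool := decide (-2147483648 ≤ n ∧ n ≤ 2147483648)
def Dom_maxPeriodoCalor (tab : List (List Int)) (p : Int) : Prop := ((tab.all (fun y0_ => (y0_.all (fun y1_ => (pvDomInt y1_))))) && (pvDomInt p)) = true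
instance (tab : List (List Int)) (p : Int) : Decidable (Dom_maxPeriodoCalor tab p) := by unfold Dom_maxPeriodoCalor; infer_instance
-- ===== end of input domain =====

-- B finds the longest low-precipitation run by recursive run-splitting over a boolean mask
-- instead of A's fold carrying a (current run, best so far) accumulator; alternative, same cost.

-- ===== PORT A =====
-- i[3] is PySem.List.pyGet? i 3; Pre_ guarantees it is some _, so .getD 0 is exact on Pre_.
def maxPeriodoCalor (tab : List (List Int)) (p : Int) : String × Int :=
  let st := tab.foldl (fun (s : Int × Int) i =>
      if (PySem.List.pyGet? i 3).getD 0 < p then (s.1 + 1, s.2)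
      else (0, if s.1 > s.2 then s.1 else s.2)) (0, 0)
  let consecutivo := if st.1 > st.2 then st.1 else st.2
  ("O nº de dias consecutivos com precipitação inferior a " ++ PySem.Int.toStr p ++ " é:",
   consecutivo)

-- ===== PORT B =====
-- run_len: length of the leading run of true and the remainder after it
def pvRunLen : List Bool → Int × List Bool
  | [] => (0, [])
  | b :: rest => if b then let r := pvRunLen rest; (r.1 + 1, r.2) else (0, b :: rest)

theorem pvRunLen_len_le : ∀ bs : List Bool, (pvRunLen bs).2.length ≤ bs.length := by
  intro bs
  induction bs with
  | nil => simp [pvRunLen]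
  | cons b t ih =>
    by_cases hb : b = true <;> simp [pvRunLen, hb] <;> omega

def pvBest : List Bool → Int
  | [] => 0
  | b :: t =>
    if b then
      let r := pvRunLen t
      max (r.1 + 1) (pvBest r.2)
    else pvBest t
termination_by bs => bs.length
decreasing_by
  · have := pvRunLen_len_le t; simpa using Nat.lt_succ_of_le this
  · simp

def maxPeriodoCalor_alt (tab : List (List Int)) (p : Int) : String × Int :=
  let low := tab.map (fun row => decide ((PySem.List.pyGet? row 3).getD 0 < p))
  ("O nº de dias consecutivos com precipitação inferior a " ++ PySem.Int.toStr p ++ " é:",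
   pvBest low)

-- ===== PRECONDITION & SPEC =====
-- Pre_ excludes rows with fewer than 4 entries: there A (i[3]) raises IndexError (B does too).
def Pre_maxPeriodoCalor (tab : List (List Int)) (p : Int) : Prop :=
  ∀ row ∈ tab, 4 ≤ row.length
instance (tab : List (List Int)) (p : Int) : Decidable (Pre_maxPeriodoCalor tab p) := by
  unfold Pre_maxPeriodoCalor; infer_instance

def pvWitness_maxPeriodoCalor : List (List Int) × Int := ([[1, 2, 3, 4], [5, 6, 7, 8]], 5)

def Spec_maxPeriodoCalor (tab : List (List Int)) (p : Int) (out : String × Int) : Prop := out = maxPeriodoCalor_alt tab p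
instance (tab : List (List Int)) (p : Int) (out : String × Int) : Decidable (Spec_maxPeriodoCalor tab p out) := by unfold Spec_maxPeriodoCalor; infer_instance

-- ===== CLAIM (what is proved, stated in full; the proofs are below) =====
def Claim_equal_maxPeriodoCalor : Prop := ∀ (tab : List (List Int)) (p : Int), Dom_maxPeriodoCalor tab p → Pre_maxPeriodoCalor tab p → Spec_maxPeriodoCalor tab p (maxPeriodoCalor tab p)

-- ===== LEMMAS AND PROOFS =====

-- proof helper: the value of A's loop continued on bl from a current run of length res
def pvF : Int → List Bool → Int
  | res, [] => res
  | res, b :: t => if b then pvF (res + 1) t else max res (pvF 0 t)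

theorem pvRunLen_nonneg (bs : List Bool) : 0 ≤ (pvRunLen bs).1 := by
  induction bs with
  | nil => simp [pvRunLen]
  | cons b t ih => by_cases hb : b = true <;> simp [pvRunLen, hb] <;> omega

theorem pvBest_nonneg : ∀ bs : List Bool, 0 ≤ pvBest bs := by
  intro bs
  induction bs using pvBest.induct with
  | case1 => simp [pvBest]
  | case2 t r ih =>
    have := pvRunLen_nonneg t
    simp [pvBest, r] at *
    omega
  | case3 b t hb ih =>
    have hb' : b = false := by simpa using hb
    subst hb'
    simpa [pvBest] using ih

-- pvBest unfolds through one whole leading run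
theorem pvBest_run (bs : List Bool) :
    pvBest bs = max (pvRunLen bs).1 (pvBest (pvRunLen bs).2) := by
  cases bs with
  | nil => simp [pvBest, pvRunLen]
  | cons b t =>
    by_cases hb : b = true
    · simp [pvBest, pvRunLen, hb]
    · have hb' : b = false := by simpa using hb
      subst hb'
      have h0 : 0 ≤ pvBest (false :: t) := pvBest_nonneg _
      simp [pvRunLen, pvBest] at *
      omega

-- pvF equals B's run-splitting value
theorem pvF_eq_best (bs : List Bool) : ∀ res : Int, 0 ≤ res →
    pvF res bs = max (res + (pvRunLen bs).1) (pvBest (pvRunLen bs).2) := by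
  induction bs with
  | nil => intro res h; simp [pvF, pvRunLen, pvBest]; omega
  | cons b t ih =>
    intro res h
    by_cases hb : b = true
    · rw [hb]
      have := ih (res + 1) (by omega)
      simp [pvF, pvRunLen, this]
      congr 1
      omega
    · have hb' : b = false := by simpa using hb
      rw [hb']
      have h1 := ih 0 le_rfl
      have h2 := pvBest_run t
      have h3 := pvBest_nonneg (false :: t)
      simp [pvF, pvRunLen, h1, pvBest] at *
      omega

-- A's fold finalised equals max of best-so-far and pvF of the rest
theorem pvFold_eq (bs : List Bool) : ∀ res consec : Int,
    (let st := bs.foldl (fun (s : Int × Int) b =>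
        if b then (s.1 + 1, s.2)
        else (0, if s.1 > s.2 then s.1 else s.2)) (res, consec);
      if st.1 > st.2 then st.1 else st.2) = max consec (pvF res bs) := by
  induction bs with
  | nil => intro res consec; simp [pvF]; omega
  | cons b t ih =>
    intro res consec
    by_cases hb : b = true
    · simpa [hb, pvF] using ih (res + 1) consec
    · have hb' : b = false := by simpa using hb
      rw [hb']
      have := ih 0 (if res > consec then res else consec)
      simp [pvF] at *
      rw [this]
      omega

-- ===== VERDICT (by name: the statement is the Claim_ definition above) =====
theorem maxPeriodoCalor_spec : Claim_equal_maxPeriodoCalor := by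
  intro tab p _ _
  unfold Spec_maxPeriodoCalor maxPeriodoCalor maxPeriodoCalor_alt
  set low := tab.map (fun row => decide ((PySem.List.pyGet? row 3).getD 0 < p)) with hlow
  have hmap : tab.foldl (fun (s : Int × Int) i =>
      if (PySem.List.pyGet? i 3).getD 0 < p then (s.1 + 1, s.2)
      else (0, if s.1 > s.2 then s.1 else s.2)) (0, 0)
      = low.foldl (fun (s : Int × Int) b =>
      if b then (s.1 + 1, s.2)
      else (0, if s.1 > s.2 then s.1 else s.2)) (0, 0) := by
    rw [hlow, List.foldl_map]
    simp
  have h1 := pvFold_eq low 0 0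
  have h2 := pvF_eq_best low 0 le_rfl
  have h3 := pvBest_run low
  have h4 := pvBest_nonneg low
  simp only [hmap]
  simp only at h1
  rw [h1, h2]
  rw [Prod.mk.injEq]
  refine ⟨rfl, ?_⟩
  omega
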